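-- pv_equiv track=rewrite | github.com/grammy-jiang/research-pipeline | src/research_pipeline/cli/cmd_validate.py | _check_sections
-- ===== SOURCE A (Python) =====
-- REQUIRED_SECTIONS = [
--     "executive summary",
--     "research question",
--     "methodology",
--     "papers reviewed",
--     "research landscape",
--     "research gaps",
--     "practical recommendations",
--     "references",
--     "appendix",
-- ]
--
-- CONDITIONAL_SECTIONS = [
--     "methodology comparison",
--     "confidence-graded findings",
--     "trade-off analysis",
--     "points of agreement",
--     "points of contradiction",
--     "reproducibility notes",
--     "evidence map",
--     "readiness assessment",
--     "future directions",
-- ]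
--
-- OPTIONAL_SECTIONS = [
--     "prior run comparison",
-- ]
--
-- def _extract_headings(text: str) -> list[str]:
--     """Extract markdown headings from text."""
--     headings = []
--     for line in text.splitlines():
--         stripped = line.strip()
--         if stripped.startswith("#"):
--             # Remove # characters and clean up
--             heading = stripped.lstrip("#").strip()
--             headings.append(heading.lower())
--     return headings
--
-- def _check_sections(
--     text: str,
-- ) -> tuple[list[str], list[str], list[str], list[str]]:
--     """Check for required, conditional, and optional sections.
--
--     Returns:
--         Tuple of (present, missing_required, present_conditional, missing_optional).
--     """
--     headings = _extract_headings(text)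
--     present = []
--     missing_required = []
--     present_conditional = []
--     missing_optional = []
--
--     for section in REQUIRED_SECTIONS:
--         found = any(section in h for h in headings)
--         if found:
--             present.append(section)
--         else:
--             missing_required.append(section)
--
--     for section in CONDITIONAL_SECTIONS:
--         found = any(section in h for h in headings)
--         if found:
--             present_conditional.append(section)
--
--     for section in OPTIONAL_SECTIONS:
--         found = any(section in h for h in headings)
--         if not found:
--             missing_optional.append(section)
--
--     return present, missing_required, present_conditional, missing_optional
-- ===== SOURCE B (Python) =====
-- REQUIRED_SECTIONS = [
--     "executive summary",
--     "research question",
--     "methodology",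
--     "papers reviewed",
--     "research landscape",
--     "research gaps",
--     "practical recommendations",
--     "references",
--     "appendix",
-- ]
--
-- CONDITIONAL_SECTIONS = [
--     "methodology comparison",
--     "confidence-graded findings",
--     "trade-off analysis",
--     "points of agreement",
--     "points of contradiction",
--     "reproducibility notes",
--     "evidence map",
--     "readiness assessment",
--     "future directions",
-- ]
--
-- OPTIONAL_SECTIONS = [
--     "prior run comparison",
-- ]
--
-- _ALL_SECTIONS = REQUIRED_SECTIONS + CONDITIONAL_SECTIONS + OPTIONAL_SECTIONS
--
--
-- def _check_sections(
--     text: str,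
-- ) -> tuple[list[str], list[str], list[str], list[str]]:
--     """One fused pass over the lines builds the set of present sections;
--     the four output lists are then derived by constant-list membership."""
--     present_set = set()
--     for line in text.splitlines():
--         stripped = line.strip()
--         if stripped.startswith("#"):
--             heading = stripped.lstrip("#").strip().lower()
--             for section in _ALL_SECTIONS:
--                 if section in heading:
--                     present_set.add(section)
--     present = [s for s in REQUIRED_SECTIONS if s in present_set]
--     missing_required = [s for s in REQUIRED_SECTIONS if s not in present_set]
--     present_conditional = [s for s in CONDITIONAL_SECTIONS if s in present_set]
--     missing_optional = [s for s in OPTIONAL_SECTIONS if s not in present_set]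
--     return present, missing_required, present_conditional, missing_optional
-- ===== Notes on version B (the rewrite author's own statement) =====
-- stated objective: alternative
-- what changed: Instead of re-scanning all headings once per constant section (section-major, three separate loops, no intermediate structure), B makes one fused heading-major pass over the lines that builds a set of present sections, then derives the four output lists by membership lookups over the constant lists.
import Mathlib
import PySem

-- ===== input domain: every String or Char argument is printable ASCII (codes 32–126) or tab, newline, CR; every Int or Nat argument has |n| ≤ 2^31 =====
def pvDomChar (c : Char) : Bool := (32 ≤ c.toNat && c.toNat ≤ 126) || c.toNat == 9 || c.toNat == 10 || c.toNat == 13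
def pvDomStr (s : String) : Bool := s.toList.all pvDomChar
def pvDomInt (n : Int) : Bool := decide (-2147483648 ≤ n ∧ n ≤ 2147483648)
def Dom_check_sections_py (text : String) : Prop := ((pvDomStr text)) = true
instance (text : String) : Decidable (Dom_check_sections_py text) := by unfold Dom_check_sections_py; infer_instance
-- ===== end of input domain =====

-- B replaces A's three section-major re-scans of the headings with one fused heading-major
-- pass that builds a set of present sections, then derives the four lists by membership
-- in that set (objective: alternative decomposition, same asymptotic cost).

-- ===== PORT A =====
def REQUIRED_SECTIONS : List String :=
  ["executive summary", "research question", "methodology", "papers reviewed",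
   "research landscape", "research gaps", "practical recommendations", "references", "appendix"]

def CONDITIONAL_SECTIONS : List String :=
  ["methodology comparison", "confidence-graded findings", "trade-off analysis",
   "points of agreement", "points of contradiction", "reproducibility notes",
   "evidence map", "readiness assessment", "future directions"]

def OPTIONAL_SECTIONS : List String := ["prior run comparison"]

-- stripped.lstrip("#").strip().lower(); lstrip("#") ported by hand as dropWhile (· == '#'), exact
def headingOf (stripped : String) : String :=
  PySem.Str.lower (PySem.Str.strip (String.ofList (stripped.toList.dropWhile (· == '#'))))

def extract_headings (text : String) : List String :=
  (PySem.Str.splitlines text).foldl (fun hs line =>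
    let stripped := PySem.Str.strip line
    if PySem.Str.startswith stripped "#" then hs ++ [headingOf stripped] else hs) []

def check_sections_py (text : String) : List String × List String × List String × List String :=
  let headings := extract_headings text
  let pm := REQUIRED_SECTIONS.foldl (fun acc sect =>
    if headings.any (fun h => PySem.Str.isIn sect h) then (acc.1 ++ [sect], acc.2)
    else (acc.1, acc.2 ++ [sect])) ([], [])
  let present_conditional := CONDITIONAL_SECTIONS.foldl (fun acc sect =>
    if headings.any (fun h => PySem.Str.isIn sect h) then acc ++ [sect] else acc) []
  let missing_optional := OPTIONAL_SECTIONS.foldl (fun acc sect =>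
    if headings.any (fun h => PySem.Str.isIn sect h) then acc else acc ++ [sect]) []
  (pm.1, pm.2, present_conditional, missing_optional)

-- ===== PORT B =====
def ALL_SECTIONS : List String := REQUIRED_SECTIONS ++ CONDITIONAL_SECTIONS ++ OPTIONAL_SECTIONS

def altBuild (lines : List String) : PySem.Set String :=
  lines.foldl (fun ps line =>
    let stripped := PySem.Str.strip line
    if PySem.Str.startswith stripped "#" then
      let heading := headingOf stripped
      ALL_SECTIONS.foldl (fun ps sect =>
        if PySem.Str.isIn sect heading then ps.add sect else ps) ps
    else ps) PySem.Set.empty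

def check_sections_py_alt (text : String) : List String × List String × List String × List String :=
  let ps := altBuild (PySem.Str.splitlines text)
  (REQUIRED_SECTIONS.filter (fun s => ps.contains s),
   REQUIRED_SECTIONS.filter (fun s => !ps.contains s),
   CONDITIONAL_SECTIONS.filter (fun s => ps.contains s),
   OPTIONAL_SECTIONS.filter (fun s => !ps.contains s))

-- ===== PRECONDITION & SPEC =====
def Spec_check_sections_py (text : String) (out : List String × List String × List String × List String) : Prop := out = check_sections_py_alt text
instance (text : String) (out : List String × List String × List String × List String) : Decidable (Spec_check_sections_py text out) := by unfold Spec_check_sections_py; infer_instance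

-- ===== CLAIM (what is proved, stated in full; the proofs are below) =====
def Claim_equal_check_sections_py : Prop := ∀ (text : String), Dom_check_sections_py text → Spec_check_sections_py text (check_sections_py text)

-- ===== LEMMAS AND PROOFS =====

-- the inner per-heading loop of B: the set gains exactly the sections contained in this heading
theorem contains_inner (h : String) (secs : List String) (s : PySem.Set String) (sec : String) :
    PySem.Set.contains (secs.foldl (fun ps sect =>
        if PySem.Str.isIn sect h then ps.add sect else ps) s) sec
      = (s.contains sec || (decide (sec ∈ secs) && PySem.Str.isIn sec h)) := by
  induction secs generalizing s with
  | nil => simp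
  | cons a t ih =>
    simp only [List.foldl_cons, ih]
    by_cases hs : sec = a
    · subst hs
      cases hin : PySem.Chars.isIn sec.toList h.toList <;>
        simp [hin, PySem.Set.mem_add]
    · cases hin : PySem.Chars.isIn a.toList h.toList <;>
        simp [hin, PySem.Set.mem_add, hs]

-- the fused outer loop of B, characterised against the per-line heading condition
theorem contains_altLoop (lines : List String) (s : PySem.Set String) (sec : String) :
    PySem.Set.contains (lines.foldl (fun ps line =>
        let stripped := PySem.Str.strip line
        if PySem.Str.startswith stripped "#" then
          let heading := headingOf stripped
          ALL_SECTIONS.foldl (fun ps sect =>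
            if PySem.Str.isIn sect heading then ps.add sect else ps) ps
        else ps) s) sec
      = (s.contains sec || (decide (sec ∈ ALL_SECTIONS) &&
          lines.any (fun line =>
            PySem.Str.startswith (PySem.Str.strip line) "#" &&
            PySem.Str.isIn sec (headingOf (PySem.Str.strip line))))) := by
  induction lines generalizing s with
  | nil => simp
  | cons l t ih =>
    simp only [List.foldl_cons, List.any_cons]
    rw [ih]
    by_cases hl : PySem.Str.startswith (PySem.Str.strip l) "#" = true
    · rw [if_pos hl, contains_inner]
      simp at hl
      cases hin : PySem.Chars.isIn sec.toList (headingOf (PySem.Str.strip l)).toList <;>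
        cases hmem : decide (sec ∈ ALL_SECTIONS) <;> simp [hin, hmem, hl]
    · rw [if_neg hl]
      simp at hl
      simp [hl]

-- A's extracted headings, characterised the same way
theorem any_extractFold (lines : List String) (hs : List String) (p : String → Bool) :
    ((lines.foldl (fun hs line =>
        let stripped := PySem.Str.strip line
        if PySem.Str.startswith stripped "#" then hs ++ [headingOf stripped] else hs) hs).any p)
      = (hs.any p || lines.any (fun line =>
          PySem.Str.startswith (PySem.Str.strip line) "#" &&
          p (headingOf (PySem.Str.strip line)))) := by
  induction lines generalizing hs with
  | nil => simp
  | cons l t ih =>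
    simp only [List.foldl_cons, List.any_cons]
    rw [ih]
    by_cases hl : PySem.Str.startswith (PySem.Str.strip l) "#" = true <;>
      simp at hl <;> simp [hl, Bool.or_assoc]

-- A's append-or-append partition loop is a pair of filters
theorem foldl_partition (p : String → Bool) (secs pr mi : List String) :
    secs.foldl (fun (acc : List String × List String) sect =>
        if p sect then (acc.1 ++ [sect], acc.2) else (acc.1, acc.2 ++ [sect])) (pr, mi)
      = (pr ++ secs.filter p, mi ++ secs.filter (fun s => !p s)) := by
  induction secs generalizing pr mi with
  | nil => simp
  | cons a t ih =>
    by_cases ha : p a = true <;> simp [ha, ih]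

-- A's append-if loop is a filter
theorem foldl_append_filter (p : String → Bool) (secs l : List String) :
    secs.foldl (fun acc sect => if p sect then acc ++ [sect] else acc) l
      = l ++ secs.filter p := by
  induction secs generalizing l with
  | nil => simp
  | cons a t ih =>
    by_cases ha : p a = true <;> simp [ha, ih]

-- A's append-if-not loop is a filter by the negation
theorem foldl_append_filter_not (p : String → Bool) (secs l : List String) :
    secs.foldl (fun acc sect => if p sect then acc else acc ++ [sect]) l
      = l ++ secs.filter (fun s => !p s) := by
  induction secs generalizing l with
  | nil => simp
  | cons a t ih =>
    by_cases ha : p a = true <;> simp [ha, ih]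

theorem mem_all_of_mem_req {sec : String} (h : sec ∈ REQUIRED_SECTIONS) : sec ∈ ALL_SECTIONS := by
  simp [ALL_SECTIONS]; exact Or.inl h

theorem mem_all_of_mem_cond {sec : String} (h : sec ∈ CONDITIONAL_SECTIONS) : sec ∈ ALL_SECTIONS := by
  simp [ALL_SECTIONS]; exact Or.inr (Or.inl h)

theorem mem_all_of_mem_opt {sec : String} (h : sec ∈ OPTIONAL_SECTIONS) : sec ∈ ALL_SECTIONS := by
  simp [ALL_SECTIONS]; exact Or.inr (Or.inr h)

-- ===== VERDICT (by name: the statement is the Claim_ definition above) =====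
theorem check_sections_py_spec : Claim_equal_check_sections_py := by
  have hempty : ∀ x : String, (PySem.Set.empty : PySem.Set String).contains x = false := fun x => rfl
  intro text _
  unfold Spec_check_sections_py check_sections_py check_sections_py_alt altBuild extract_headings
  simp only [foldl_partition, foldl_append_filter, foldl_append_filter_not, List.nil_append]
  refine Prod.ext ?_ (Prod.ext ?_ (Prod.ext ?_ ?_)) <;>
    simp only <;>
    refine List.filter_congr (fun sec hmem => ?_) <;>
    rw [contains_altLoop] <;>
    simp only [hempty, Bool.false_or] <;>
    first
      | (rw [decide_eq_true (mem_all_of_mem_req hmem), Bool.true_and, any_extractFold]; simp)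
      | (rw [decide_eq_true (mem_all_of_mem_cond hmem), Bool.true_and, any_extractFold]; simp)
      | (rw [decide_eq_true (mem_all_of_mem_opt hmem), Bool.true_and, any_extractFold]; simp)
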